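-- pv_equiv track=rewrite | github.com/heitorchang/learn-code | battles/tourneys/20170414_1115.py | gravitation
-- ===== SOURCE A (Python) =====
-- def gravitation(rows):
--
--     minTimer = len(rows)
--     answer = []
--     for i in range(len(rows[0])):
--         finish = len(rows) - 1
--         timer = 0
--         for j in range(len(rows) - 1, -1, -1):
--             if rows[j][i] == '#':
--                 timer = j - finish
--                 finish -= 1
--         if timer == minTimer:
--             answer.append(i)
--         if timer < minTimer:
--             minTimer = timer
--             answer = [i]
--     return answer
-- ===== SOURCE B (Python) =====
-- def gravitation(rows):
--     # Single top-down pass over whole rows: per-column (seen-'#', gap-count) pairs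
--     # rebuilt with zip each row; then min-then-filter argmin. Timer = -(gaps below top '#').
--     state = [(False, 0)] * len(rows[0])
--     for row in rows:
--         state = [(seen or c == '#', g if c == '#' or not seen else g - 1)
--                  for (seen, g), c in zip(state, row)]
--     timers = [g for _, g in state]
--     if not timers:
--         return []
--     m = min(timers)
--     return [i for i, g in enumerate(timers) if g == m]
-- ===== Notes on version B (the rewrite author's own statement) =====
-- stated objective: alternative
-- what changed: Replaces A's column-major bottom-up falling-finish-pointer simulation fused with a running minimum by a row-major single sweep: one pass over the rows rebuilds, via zip, a per-column (seen-'#', gap-count) state vector (the timer is minus the number of non-'#' cells below the topmost '#'), then an argmin min-then-filter selects the columns.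
import Mathlib
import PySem

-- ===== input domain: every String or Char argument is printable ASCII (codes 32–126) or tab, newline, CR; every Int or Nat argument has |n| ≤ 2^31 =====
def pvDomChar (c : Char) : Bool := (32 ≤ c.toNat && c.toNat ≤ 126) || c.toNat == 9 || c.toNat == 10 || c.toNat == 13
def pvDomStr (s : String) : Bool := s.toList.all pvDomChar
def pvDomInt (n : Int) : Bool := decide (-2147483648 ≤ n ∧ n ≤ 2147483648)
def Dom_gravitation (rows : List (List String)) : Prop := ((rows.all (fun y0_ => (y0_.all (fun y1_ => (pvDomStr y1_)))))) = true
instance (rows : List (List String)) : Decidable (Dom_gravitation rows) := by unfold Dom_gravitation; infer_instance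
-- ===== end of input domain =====

-- B replaces A's column-major bottom-up finish-pointer simulation fused with a running minimum
-- by a row-major single sweep (zip-rebuilt per-column (seen,gaps) states) + min-then-filter argmin
-- (objective: alternative).

-- ===== PORT A =====
-- rows[j][i] == '#'  (A's cell access; none = IndexError, excluded by Pre_)
def pvCell (rows : List (List String)) (i j : Int) : Bool :=
  ((PySem.List.pyGet? rows j).bind (fun r => PySem.List.pyGet? r i)) == some "#"

-- body of A's inner loop: 'if rows[j][i] == "#": timer = j - finish; finish -= 1'
def pvFallStep (rows : List (List String)) (i : Int) (fj : Int × Int) (j : Int) : Int × Int :=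
  if pvCell rows i j then (fj.1 - 1, j - fj.1) else fj

-- tail of A's outer loop body: 'if timer == minTimer: …'  then  'if timer < minTimer: …'
def pvMinStep (st : Int × List Int) (i timer : Int) : Int × List Int :=
  let st1 := if timer = st.1 then (st.1, st.2 ++ [i]) else st
  if timer < st.1 then (timer, [i]) else st1

def gravitation (rows : List (List String)) : List Int :=
  ((PySem.List.pyRange 0 ((rows.headD []).length : Int) 1).foldl
    (fun st i =>
      pvMinStep st i
        ((PySem.List.pyRange ((rows.length : Int) - 1) (-1) (-1)).foldl (pvFallStep rows i)
          ((rows.length : Int) - 1, 0)).2)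
    ((rows.length : Int), [])).2

-- ===== PORT B =====
-- per-cell update of B's row comprehension: (seen or c=='#', g if c=='#' or not seen else g-1)
def pvColStep (s : Bool × Int) (c : String) : Bool × Int :=
  (s.1 || (c == "#"), if (c == "#") || !s.1 then s.2 else s.2 - 1)

-- one row of B: state = [... for (seen, g), c in zip(state, row)]
def pvRowStep (st : List (Bool × Int)) (row : List String) : List (Bool × Int) :=
  (st.zip row).map (fun p => pvColStep p.1 p.2)

def gravitation_alt (rows : List (List String)) : List Int :=
  let state := rows.foldl pvRowStep (List.replicate (rows.headD []).length ((false : Bool), (0 : Int)))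
  let timers := state.map Prod.snd
  match PySem.List.min? timers (fun t => t) with
  | none => []
  | some m => ((PySem.List.enumerate timers 0).filter (fun p => p.2 == m)).map (fun p => p.1)

-- ===== PRECONDITION & SPEC =====
-- Pre_ excludes exactly the inputs on which A raises IndexError: the empty grid (rows[0])
-- and grids where some row is shorter than the first row (rows[j][i]).
def Pre_gravitation (rows : List (List String)) : Prop :=
  rows ≠ [] ∧ ∀ r ∈ rows, (rows.headD []).length ≤ r.length
instance (rows : List (List String)) : Decidable (Pre_gravitation rows) := by
  unfold Pre_gravitation; infer_instance
def pvWitness_gravitation : List (List String) := [["#", "."], [".", "#"]]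

def Spec_gravitation (rows : List (List String)) (out : List Int) : Prop := out = gravitation_alt rows
instance (rows : List (List String)) (out : List Int) : Decidable (Spec_gravitation rows out) := by unfold Spec_gravitation; infer_instance

-- ===== CLAIM (what is proved, stated in full; the proofs are below) =====
def Claim_equal_gravitation : Prop := ∀ (rows : List (List String)), Dom_gravitation rows → Pre_gravitation rows → Spec_gravitation rows (gravitation rows)

-- ===== LEMMAS AND PROOFS =====

-- column i of the grid, as a list of cells (top to bottom)
def pvCol (rows : List (List String)) (i : Int) : List String :=
  rows.map (fun r => PySem.List.pyGetD r i "")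

-- number of non-'#' / '#' cells of a column segment
def pvNonHash (col : List String) : Int := (col.countP (fun c => !(c == "#")) : Int)
def pvHash (col : List String) : Int := (col.countP (fun c => c == "#") : Int)

-- the column's timer: 0 if no '#', else -(non-'#' cells strictly below the topmost '#')
def pvSpecTimer : List String → Int
  | [] => 0
  | c :: rest => if c == "#" then -(pvNonHash rest) else pvSpecTimer rest

-- top/count accumulator over (index, row) pairs, for A's analysis
def pvTCStep (i : Int) (s : Option Int × Int) (p : Int × List String) : Option Int × Int :=
  if PySem.List.pyGetD p.2 i "" == "#" then
    ((if s.1 = none then some p.1 else s.1), s.2 + 1)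
  else s

-- same accumulator driven by the row index alone (A's scan order)
def pvTopCountStep (rows : List (List String)) (i : Int) (tc : Option Int × Int) (j : Int) :
    Option Int × Int :=
  if pvCell rows i j then ((if tc.1 = none then some j else tc.1), tc.2 + 1) else tc

lemma pv_hash_nonhash : ∀ (col : List String), pvHash col + pvNonHash col = (col.length : Int) := by
  intro col
  induction col with
  | nil => simp [pvHash, pvNonHash]
  | cons c rest ih =>
    simp only [pvHash, pvNonHash, List.countP_cons, List.length_cons] at ih ⊢
    by_cases hc : (c == "#") <;> simp [hc] at * <;> omega

lemma pv_nonhash_nonneg (col : List String) : 0 ≤ pvNonHash col := by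
  simp [pvNonHash]

lemma pv_spec_nonpos : ∀ (col : List String), pvSpecTimer col ≤ 0 := by
  intro col
  induction col with
  | nil => simp [pvSpecTimer]
  | cons c rest ih =>
    simp only [pvSpecTimer]
    split_ifs
    · have := pv_nonhash_nonneg rest; omega
    · exact ih

-- A's cell test agrees with the pyGetD form for an in-range row index
lemma pv_cell_eq (rows : List (List String)) (i j : Int) (h0 : 0 ≤ j)
    (h1 : j < (rows.length : Int)) :
    pvCell rows i j = (PySem.List.pyGetD (PySem.List.pyGetD rows j []) i "" == "#") := by
  obtain ⟨k, rfl⟩ : ∃ k : Nat, j = (k : Int) := ⟨j.toNat, (Int.toNat_of_nonneg h0).symm⟩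
  have hk : k < rows.length := by exact_mod_cast h1
  have hrow : PySem.List.pyGet? rows (k : Int) = some rows[k] := by
    rw [PySem.List.pyGet?_natCast]; exact List.getElem?_eq_getElem hk
  have hrowD : PySem.List.pyGetD rows (k : Int) [] = rows[k] := by
    simp [PySem.List.pyGetD, hrow]
  rw [pvCell, hrow, hrowD]
  rcases h2 : PySem.List.pyGet? rows[k] i with _ | v
  · simp [PySem.List.pyGetD, h2]
  · simp [PySem.List.pyGetD, h2]

-- A's index-driven scan is the enumerate-driven scan
lemma pv_range_fold_enum (rows : List (List String)) (i : Int) (s : Option Int × Int) :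
    (PySem.List.pyRange 0 (rows.length : Int) 1).foldl (pvTopCountStep rows i) s =
      (PySem.List.enumerate rows 0).foldl (pvTCStep i) s := by
  rw [PySem.List.enumerate_eq_map_pyRange rows [], List.foldl_map]
  have hlen : PySem.List.len rows = (rows.length : Int) := by simp [PySem.List.len]
  rw [hlen]
  apply PySem.List.foldl_congr_mem
  intro acc j hj
  obtain ⟨hj0, hj1⟩ := PySem.List.mem_pyRange_one.mp hj
  simp only [pvTopCountStep, pvTCStep, pv_cell_eq rows i j hj0 hj1]

-- once top is set, the scan only adds the '#' count of the remaining rows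
lemma pv_tc_some (i : Int) :
    ∀ (l : List (List String)) (a t c : Int),
      (PySem.List.enumerate l a).foldl (pvTCStep i) (some t, c) =
        (some t, c + pvHash (pvCol l i)) := by
  intro l
  induction l with
  | nil => intro a t c; simp [PySem.List.enumerate_nil, pvCol, pvHash]
  | cons r l ih =>
    intro a t c
    rw [PySem.List.enumerate_cons, List.foldl_cons]
    by_cases hc : (PySem.List.pyGetD r i "" == "#")
    · have hstep : pvTCStep i (some t, c) (a, r) = (some t, c + 1) := by
        simp [pvTCStep, hc]
      rw [hstep, ih]
      simp only [pvCol, List.map_cons, pvHash, List.countP_cons, hc]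
      push_cast
      ring_nf
    · have hstep : pvTCStep i (some t, c) (a, r) = (some t, c) := by
        simp [pvTCStep, hc]
      rw [hstep, ih]
      simp [pvCol, pvHash, hc]

-- closed form of the scan result: B's spec timer
lemma pv_tc_main (i : Int) :
    ∀ (l : List (List String)) (a : Int),
      (match (PySem.List.enumerate l a).foldl (pvTCStep i) ((none : Option Int), (0 : Int)) with
       | (none, _) => (0 : Int)
       | (some top, c) => top - (a + (l.length : Int)) + c) = pvSpecTimer (pvCol l i) := by
  intro l
  induction l with
  | nil => intro a; simp [PySem.List.enumerate_nil, pvCol, pvSpecTimer]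
  | cons r l ih =>
    intro a
    rw [PySem.List.enumerate_cons, List.foldl_cons]
    by_cases hc : (PySem.List.pyGetD r i "" == "#")
    · have hstep : pvTCStep i (none, 0) (a, r) = (some a, 1) := by simp [pvTCStep, hc]
      rw [hstep, pv_tc_some]
      show a - (a + ((r :: l).length : Int)) + (1 + pvHash (pvCol l i)) =
        pvSpecTimer (pvCol (r :: l) i)
      have h1 := pv_hash_nonhash (pvCol l i)
      have hcol : pvCol (r :: l) i = PySem.List.pyGetD r i "" :: pvCol l i := by simp [pvCol]
      have h2 : ((pvCol l i).length : Int) = (l.length : Int) := by simp [pvCol]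
      rw [hcol]
      simp only [pvSpecTimer, hc, if_true, List.length_cons]
      push_cast
      omega
    · have hstep : pvTCStep i (none, 0) (a, r) = (none, 0) := by simp [pvTCStep, hc]
      rw [hstep]
      have hih := ih (a + 1)
      rcases hfold : (PySem.List.enumerate l (a + 1)).foldl (pvTCStep i)
          ((none : Option Int), (0 : Int)) with ⟨top?, c⟩
      rw [hfold] at hih
      have hcol : pvCol (r :: l) i = PySem.List.pyGetD r i "" :: pvCol l i := by simp [pvCol]
      rcases top? with _ | top
      · show (0 : Int) = pvSpecTimer (pvCol (r :: l) i)
        rw [hcol]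
        simpa [pvSpecTimer, hc] using hih
      · have hih' : top - (a + 1 + (l.length : Int)) + c = pvSpecTimer (pvCol l i) := hih
        show top - (a + ((r :: l).length : Int)) + c = pvSpecTimer (pvCol (r :: l) i)
        rw [hcol]
        simp only [pvSpecTimer, hc, List.length_cons]
        rw [← hih']
        push_cast
        ring

-- if top is still none, no '#' was seen, so the count is 0
lemma pv_tc_none (rows : List (List String)) (i : Int) :
    ∀ (js : List Int) (s : Option Int × Int), (s.1 = none → s.2 = 0) →
      (js.foldl (pvTopCountStep rows i) s).1 = none → (js.foldl (pvTopCountStep rows i) s).2 = 0 := by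
  intro js
  induction js with
  | nil => intro s hs h; exact hs h
  | cons j js ih =>
    intro s hs h
    refine ih _ ?_ h
    intro h1
    simp only [pvTopCountStep] at h1 ⊢
    by_cases hc : pvCell rows i j
    · simp only [hc, if_true] at h1
      rcases h : s.1 with _ | v <;> simp [h] at h1
    · simpa [hc] using hs (by simpa [hc] using h1)

-- KEY (A side): the bottom-up finish-pointer fold equals a function of the top-down scan.
-- Stated over l = (index list).reverse so that plain cons-induction applies.
lemma pv_fall_key (rows : List (List String)) (i : Int) :
    ∀ (l : List Int) (fin t : Int),
      l.foldl (pvFallStep rows i) (fin, t) =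
        (fin - (l.reverse.foldl (pvTopCountStep rows i) (none, 0)).2,
         match (l.reverse.foldl (pvTopCountStep rows i) (none, 0)).1 with
         | none => t
         | some top => top - (fin - ((l.reverse.foldl (pvTopCountStep rows i) (none, 0)).2 - 1))) := by
  intro l
  induction l with
  | nil => intro fin t; simp
  | cons x l ih =>
    intro fin t
    have hrev : (x :: l).reverse = l.reverse ++ [x] := by simp
    rw [hrev, List.foldl_append]
    rcases htc : l.reverse.foldl (pvTopCountStep rows i) (none, 0) with ⟨top?, c⟩
    by_cases hc : pvCell rows i x
    · have hstepA : pvFallStep rows i (fin, t) x = (fin - 1, x - fin) := by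
        simp [pvFallStep, hc]
      rw [List.foldl_cons, hstepA, ih, htc]
      rcases top? with _ | top
      · have hc0 : c = 0 := by
          have := pv_tc_none rows i l.reverse (none, 0) (by simp)
          rw [htc] at this; exact this rfl
        subst hc0
        simp [pvTopCountStep, hc]
      · simp [pvTopCountStep, hc]
        omega
    · have hstepA : pvFallStep rows i (fin, t) x = (fin, t) := by
        simp [pvFallStep, hc]
      rw [List.foldl_cons, hstepA, ih, htc]
      simp [pvTopCountStep, hc]

-- A's inner loop over range(n-1, -1, -1) computes exactly B's spec timer of the column
lemma pv_timer_eq (rows : List (List String)) (i : Int) :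
    ((PySem.List.pyRange ((rows.length : Int) - 1) (-1) (-1)).foldl (pvFallStep rows i)
      ((rows.length : Int) - 1, 0)).2 = pvSpecTimer (pvCol rows i) := by
  have hr : PySem.List.pyRange ((rows.length : Int) - 1) (-1) (-1) =
      (PySem.List.pyRange 0 (rows.length : Int) 1).reverse := by
    rw [PySem.List.pyRange_neg_one_eq_reverse]
    norm_num
  rw [hr, pv_fall_key, List.reverse_reverse, pv_range_fold_enum]
  have hmain := pv_tc_main i rows 0
  rcases htc : (PySem.List.enumerate rows 0).foldl (pvTCStep i)
      ((none : Option Int), (0 : Int)) with ⟨top?, c⟩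
  rw [htc] at hmain
  rcases top? with _ | top
  · exact hmain
  · have hmain' : top - (0 + (rows.length : Int)) + c = pvSpecTimer (pvCol rows i) := hmain
    show top - ((rows.length : Int) - 1 - (c - 1)) = pvSpecTimer (pvCol rows i)
    omega

-- B side: one zip-rebuilt row step, as a pointwise column update (row at least w wide)
lemma pv_rowstep_map (w : Nat) (f : Int → Bool × Int) (row : List String) (h : w ≤ row.length) :
    pvRowStep ((PySem.List.pyRange 0 (w : Int) 1).map f) row =
      (PySem.List.pyRange 0 (w : Int) 1).map
        (fun i => pvColStep (f i) (PySem.List.pyGetD row i "")) := by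
  apply List.ext_getElem
  · simp [pvRowStep, PySem.List.length_pyRange_one]
    omega
  · intro k h1 h2
    have hkw : k < w := by
      simpa [PySem.List.length_pyRange_one] using h2
    have hkr : k < row.length := lt_of_lt_of_le hkw h
    simp only [pvRowStep, List.getElem_map, List.getElem_zip, PySem.List.getElem_pyRange_one]
    congr 1
    have : (0 : Int) + (k : Int) = ((k : Nat) : Int) := by omega
    rw [this, PySem.List.pyGetD_natCast, List.getD_eq_getElem _ _ hkr]

-- B's whole-grid fold distributes into independent per-column folds
lemma pv_state_eq (w : Nat) :
    ∀ (rs : List (List String)) (f : Int → Bool × Int), (∀ r ∈ rs, w ≤ r.length) →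
      rs.foldl pvRowStep ((PySem.List.pyRange 0 (w : Int) 1).map f) =
        (PySem.List.pyRange 0 (w : Int) 1).map (fun i => (pvCol rs i).foldl pvColStep (f i)) := by
  intro rs
  induction rs with
  | nil => intro f h; simp [pvCol]
  | cons r rs ih =>
    intro f h
    rw [List.foldl_cons, pv_rowstep_map w f r (h r (List.mem_cons_self)),
      ih _ (fun r' hr' => h r' (List.mem_cons_of_mem _ hr'))]
    apply List.map_congr_left
    intro i _
    simp [pvCol]

lemma pv_replicate (w : Nat) :
    List.replicate w ((false : Bool), (0 : Int)) =
      (PySem.List.pyRange 0 (w : Int) 1).map (fun _ => ((false : Bool), (0 : Int))) := by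
  rw [List.map_const', PySem.List.length_pyRange_one]
  simp

-- once '#' was seen, the column fold subtracts every later non-'#' cell
lemma pv_colstep_true : ∀ (col : List String) (g : Int),
    col.foldl pvColStep (true, g) = (true, g - pvNonHash col) := by
  intro col
  induction col with
  | nil => intro g; simp [pvNonHash]
  | cons c rest ih =>
    intro g
    rw [List.foldl_cons]
    by_cases hc : (c == "#")
    · simp only [pvColStep, hc, Bool.true_or, if_true]
      rw [ih]
      simp [pvNonHash, hc]
    · have hstep : pvColStep (true, g) c = (true, g - 1) := by
        simp [pvColStep, hc]
      rw [hstep, ih]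
      simp [pvNonHash, hc]
      ring

-- B's per-column fold computes the spec timer
lemma pv_colfold_spec : ∀ (col : List String),
    (col.foldl pvColStep ((false : Bool), (0 : Int))).2 = pvSpecTimer col := by
  intro col
  induction col with
  | nil => simp [pvSpecTimer]
  | cons c rest ih =>
    rw [List.foldl_cons]
    by_cases hc : (c == "#")
    · have hstep : pvColStep (false, 0) c = (true, 0) := by simp [pvColStep, hc]
      rw [hstep, pv_colstep_true]
      simp [pvSpecTimer, hc]
    · have hstep : pvColStep (false, 0) c = (false, 0) := by simp [pvColStep, hc]
      rw [hstep, ih]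
      simp [pvSpecTimer, hc]

-- uncurried form of A's min/collect step, for folding over (index, timer) pairs
def pvMinStepP (st : Int × List Int) (p : Int × Int) : Int × List Int :=
  pvMinStep st p.1 p.2

-- fold of A's step over indices with computed timers = fold of the uncurried step over pairs
lemma pv_foldl_pair (g : Int → Int) :
    ∀ (l : List Int) (st : Int × List Int),
      l.foldl (fun st i => pvMinStep st i (g i)) st =
        (l.map (fun i => (i, g i))).foldl pvMinStepP st := by
  intro l
  induction l with
  | nil => intro st; rfl
  | cons x l ih => intro st; simp only [List.foldl_cons, List.map_cons, ih]; rfl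

-- enumerate distributes over map
lemma pv_enum_map {α β : Type} (f : α → β) :
    ∀ (l : List α) (s : Int),
      PySem.List.enumerate (l.map f) s = (PySem.List.enumerate l s).map (fun p => (p.1, f p.2)) := by
  intro l
  induction l with
  | nil => intro s; simp [PySem.List.enumerate_nil]
  | cons x l ih => intro s; simp [PySem.List.enumerate_cons, ih]

-- enumerating range(a, a+k) from a pairs each index with itself
lemma pv_enum_range :
    ∀ (k : Nat) (a : Int),
      PySem.List.enumerate (PySem.List.pyRange a (a + (k : Int)) 1) a =
        (PySem.List.pyRange a (a + (k : Int)) 1).map (fun i => (i, i)) := by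
  intro k
  induction k with
  | zero => intro a; simp [PySem.List.pyRange_one_eq_nil, PySem.List.enumerate_nil]
  | succ k ih =>
    intro a
    have hcons : PySem.List.pyRange a (a + ((k + 1 : Nat) : Int)) 1 =
        a :: PySem.List.pyRange (a + 1) ((a + 1) + (k : Int)) 1 := by
      rw [PySem.List.pyRange_one_cons (by push_cast; omega)]
      congr 1
      push_cast
      ring_nf
    rw [hcons]
    simp [PySem.List.enumerate_cons, ih (a + 1)]

-- running minimum is antitone in its seed
lemma pv_foldl_min_le : ∀ (ts : List Int) (a : Int), ts.foldl min a ≤ a := by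
  intro ts
  induction ts with
  | nil => intro a; simp
  | cons t ts ih =>
    intro a
    calc (t :: ts).foldl min a = ts.foldl min (min a t) := by rw [List.foldl_cons]
    _ ≤ min a t := ih _
    _ ≤ a := min_le_left _ _

-- min seed commutes out of the fold
lemma pv_foldl_min_min : ∀ (ts : List Int) (a b : Int), ts.foldl min (min a b) = min a (ts.foldl min b) := by
  intro ts
  induction ts with
  | nil => intro a b; rfl
  | cons t ts ih =>
    intro a b
    rw [List.foldl_cons, List.foldl_cons, min_assoc, ih]

-- A's fused running-minimum collector over indexed timers = min-then-filter argmin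
lemma pv_fused :
    ∀ (ts : List Int) (s m0 : Int) (acc : List Int),
      (PySem.List.enumerate ts s).foldl pvMinStepP (m0, acc) =
        (ts.foldl min m0,
         (if ts.foldl min m0 = m0 then acc else []) ++
           ((PySem.List.enumerate ts s).filter (fun p => p.2 == ts.foldl min m0)).map
             (fun p => p.1)) := by
  intro ts
  induction ts with
  | nil => intro s m0 acc; simp [PySem.List.enumerate_nil]
  | cons t ts ih =>
    intro s m0 acc
    rw [PySem.List.enumerate_cons, List.foldl_cons, List.foldl_cons]
    have hM : ts.foldl min (min m0 t) ≤ min m0 t := pv_foldl_min_le ts (min m0 t)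
    rcases lt_trichotomy t m0 with hlt | heq | hgt
    · have hmin : min m0 t = t := by omega
      rw [hmin] at hM ⊢
      have hstep : pvMinStepP (m0, acc) (s, t) = (t, [s]) := by
        simp only [pvMinStepP, pvMinStep]
        rw [if_pos hlt]
      rw [hstep, ih]
      rcases eq_or_lt_of_le hM with hMeq | hMlt
      · rw [hMeq]
        simp [show ¬ (t = m0) by omega]
      · have h1 : ¬ (ts.foldl min t = t) := by omega
        have h2 : ¬ (ts.foldl min t = m0) := by omega
        have h3 : (t == ts.foldl min t) = false := by
          rw [beq_eq_false_iff_ne]; omega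
        simp [h1, h2, h3]
    · subst heq
      rw [min_self] at hM ⊢
      have hstep : pvMinStepP (t, acc) (s, t) = (t, acc ++ [s]) := by
        simp [pvMinStepP, pvMinStep]
      rw [hstep, ih]
      rcases eq_or_lt_of_le hM with hMeq | hMlt
      · rw [hMeq]
        simp
      · have h1 : ¬ (ts.foldl min t = t) := by omega
        have h3 : (t == ts.foldl min t) = false := by
          rw [beq_eq_false_iff_ne]; omega
        simp [h1, h3]
    · have hmin : min m0 t = m0 := by omega
      rw [hmin] at hM ⊢
      have hstep : pvMinStepP (m0, acc) (s, t) = (m0, acc) := by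
        simp [pvMinStepP, pvMinStep, show ¬ (t < m0) by omega, show ¬ (t = m0) by omega]
      rw [hstep, ih]
      have h3 : (t == ts.foldl min m0) = false := by
        rw [beq_eq_false_iff_ne]; omega
      simp [h3]

-- ===== VERDICT (by name: the statement is the Claim_ definition above) =====
theorem gravitation_spec : Claim_equal_gravitation := by
  intro rows _ hpre
  obtain ⟨hne, hlen⟩ := hpre
  unfold Spec_gravitation gravitation gravitation_alt
  dsimp only
  -- B side: distribute the row-major fold into per-column spec timers
  rw [pv_replicate, pv_state_eq (rows.headD []).length rows _ hlen, List.map_map]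
  have hcomp : Prod.snd ∘ (fun i => (pvCol rows i).foldl pvColStep ((false : Bool), (0 : Int))) =
      fun i : Int => pvSpecTimer (pvCol rows i) := funext (fun i => pv_colfold_spec _)
  rw [hcomp]
  -- A side: per-column timers, then the fused collector
  simp only [pv_timer_eq]
  rw [pv_foldl_pair (fun i => pvSpecTimer (pvCol rows i))]
  have henum : (PySem.List.pyRange 0 ((rows.headD []).length : Int) 1).map
      (fun i => (i, pvSpecTimer (pvCol rows i))) =
      PySem.List.enumerate
        ((PySem.List.pyRange 0 ((rows.headD []).length : Int) 1).map
          (fun i => pvSpecTimer (pvCol rows i))) 0 := by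
    rw [pv_enum_map]
    have h0 : ((rows.headD []).length : Int) = 0 + ((rows.headD []).length : Int) := by omega
    rw [h0, pv_enum_range ((rows.headD []).length) 0, List.map_map]
    rfl
  rw [henum, pv_fused]
  rcases hc : (rows.headD []).length with _ | c
  · simp [PySem.List.pyRange_one_eq_nil, PySem.List.enumerate_nil, PySem.List.min?]
  · have hcons : PySem.List.pyRange 0 (((c : Nat) + 1 : Nat) : Int) 1 =
        0 :: PySem.List.pyRange 1 (((c : Nat) + 1 : Nat) : Int) 1 := by
      rw [PySem.List.pyRange_one_cons (by push_cast; omega)]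
      norm_num
    rw [hcons, List.map_cons, PySem.List.min?_id_cons]
    set t0 := pvSpecTimer (pvCol rows 0) with ht0
    set rest := (PySem.List.pyRange 1 (((c : Nat) + 1 : Nat) : Int) 1).map
      (fun i => pvSpecTimer (pvCol rows i)) with hrest
    have hm : (t0 :: rest).foldl min (rows.length : Int) = rest.foldl min t0 := by
      rw [List.foldl_cons, pv_foldl_min_min]
      have h1 : rest.foldl min t0 ≤ t0 := pv_foldl_min_le rest t0
      have h2 : t0 ≤ (rows.length : Int) := by
        have := pv_spec_nonpos (pvCol rows 0)
        have : (0 : Int) ≤ (rows.length : Int) := by positivity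
        omega
      omega
    rw [hm]
    simp
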